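-- pv_equiv track=rewrite | github.com/Durgaprasad-kakarla/Geeks-for-Geeks | Difficulty: Easy/Tywin's War Strategy/tywins-war-strategy.py | minSoldiers
-- ===== SOURCE A (Python) =====
-- def minSoldiers(arr, k):
--     # code here
--     n=len(arr)
--     if n%2==0:
--         soldiers=n//2
--     else:
--         soldiers=n//2+1
--     cnt,lst=0,[]
--     for i in range(n):
--         if arr[i]%k==0:
--             cnt+=1
--         else:
--             lst.append(k-(arr[i]%k))
--     if cnt>=soldiers:
--         return 0
--     mini_soldiers=0
--     lst.sort()
--     i=0
--     while cnt<soldiers: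
--         mini_soldiers+=lst[i]
--         cnt+=1
--         i+=1
--     return mini_soldiers
-- ===== SOURCE B (Python) =====
-- def _sum_smallest(lst, m):
--     # sum of the m smallest elements of lst (1 <= m <= len(lst)), quickselect-style
--     p = lst[len(lst) // 2]
--     less = [x for x in lst if x < p]
--     eq = [x for x in lst if x == p]
--     if m <= len(less):
--         return _sum_smallest(less, m)
--     if m <= len(less) + len(eq):
--         return sum(less) + p * (m - len(less))
--     gt = [x for x in lst if x > p]
--     return sum(less) + p * len(eq) + _sum_smallest(gt, m - len(less) - len(eq))
--
--
-- def minSoldiers(arr, k):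
--     need = (len(arr) + 1) // 2
--     costs = [k - a % k for a in arr if a % k != 0]
--     m = need - (len(arr) - len(costs))
--     if m <= 0:
--         return 0
--     return _sum_smallest(costs, m)
-- ===== Notes on version B (the rewrite author's own statement) =====
-- stated objective: alternative
-- what changed: Replaces sort-the-costs-then-sum-a-prefix by a quickselect-style partition recursion that sums the m smallest costs without ever sorting (O(n) average instead of O(n log n)).
import Mathlib
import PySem

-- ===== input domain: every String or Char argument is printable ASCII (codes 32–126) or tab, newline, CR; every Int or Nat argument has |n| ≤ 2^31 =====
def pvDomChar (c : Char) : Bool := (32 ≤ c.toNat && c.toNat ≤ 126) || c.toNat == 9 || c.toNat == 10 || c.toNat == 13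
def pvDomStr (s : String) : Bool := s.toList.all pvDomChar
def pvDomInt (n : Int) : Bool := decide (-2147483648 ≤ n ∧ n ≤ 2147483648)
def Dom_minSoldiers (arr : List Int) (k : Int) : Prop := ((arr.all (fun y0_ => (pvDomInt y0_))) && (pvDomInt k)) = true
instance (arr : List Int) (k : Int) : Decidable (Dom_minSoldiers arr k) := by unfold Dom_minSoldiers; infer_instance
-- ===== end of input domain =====

-- B replaces sort-then-prefix-sum by a quickselect-style recursion summing the m smallest costs (alternative algorithm, O(n) average).

-- ===== PORT A =====
-- the 'while cnt<soldiers' loop of A; lst[i] via pyGet? (none = IndexError, never reached on Pre_)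
def minSoldiersLoop (lst : List Int) (soldiers cnt mini i : Int) : Int :=
  if _h : cnt < soldiers then
    match PySem.List.pyGet? lst i with
    | none => mini   -- IndexError (unreachable: the loop always stays in range)
    | some v => minSoldiersLoop lst soldiers (cnt + 1) (mini + v) (i + 1)
  else mini
termination_by (soldiers - cnt).toNat
decreasing_by omega

def minSoldiers (arr : List Int) (k : Int) : Int :=
  let n : Int := arr.length
  let soldiers : Int := if PySem.Int.mod n 2 = 0 then PySem.Int.floordiv n 2
                        else PySem.Int.floordiv n 2 + 1
  -- for i in range(n): … arr[i] …   (i always in range, so we fold over the elements)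
  let st := arr.foldl (fun (s : Int × List Int) a =>
      if PySem.Int.mod a k = 0 then (s.1 + 1, s.2)
      else (s.1, s.2 ++ [k - PySem.Int.mod a k])) (0, [])
  if st.1 ≥ soldiers then 0
  else minSoldiersLoop (PySem.List.sorted st.2 (fun x => x) false) soldiers st.1 0 0

-- ===== PORT B =====
-- helper for termination: filtering out the pivot makes the list strictly shorter
theorem pv_filter_lt_of_mem {p : Int} {lst : List Int} (q : Int → Bool)
    (hm : p ∈ lst) (hq : q p = false) : (lst.filter q).length < lst.length :=
  List.length_filter_lt_length_iff_exists.mpr ⟨p, hm, by simp [hq]⟩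

theorem pv_filter_lt_len {p : Int} {lst : List Int} (hm : p ∈ lst) :
    (lst.filter (fun x => x < p)).length < lst.length :=
  pv_filter_lt_of_mem _ hm (by simp)

theorem pv_filter_gt_len {p : Int} {lst : List Int} (hm : p ∈ lst) :
    (lst.filter (fun x => p < x)).length < lst.length :=
  pv_filter_lt_of_mem _ hm (by simp)

def sumSmallest (lst : List Int) (m : Int) : Int :=
  match hp : PySem.List.pyGet? lst (PySem.Int.floordiv (lst.length : Int) 2) with
  | none => 0   -- IndexError (Python only calls with lst nonempty, so never reached)
  | some p =>
    let less := lst.filter (fun x => x < p)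
    let eq := lst.filter (fun x => x == p)
    if m ≤ less.length then sumSmallest less m
    else if m ≤ less.length + eq.length then less.sum + p * (m - less.length)
    else
      let gt := lst.filter (fun x => p < x)
      less.sum + p * eq.length + sumSmallest gt (m - less.length - eq.length)
termination_by lst.length
decreasing_by
  · simp only [List.length_unattach, ← List.countP_eq_length_filter]
    rw [List.countP_attach (p := fun x => decide (x < p))]
    have h1 := pv_filter_lt_len (PySem.List.mem_of_pyGet?_eq_some _ hp)
    simp only [← List.countP_eq_length_filter] at h1
    exact h1
  · simp only [List.length_unattach, ← List.countP_eq_length_filter]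
    rw [List.countP_attach (p := fun x => decide (p < x))]
    have h1 := pv_filter_gt_len (PySem.List.mem_of_pyGet?_eq_some _ hp)
    simp only [← List.countP_eq_length_filter] at h1
    exact h1

def minSoldiers_alt (arr : List Int) (k : Int) : Int :=
  let need := PySem.Int.floordiv ((arr.length : Int) + 1) 2
  let costs := (arr.filter (fun a => PySem.Int.mod a k ≠ 0)).map (fun a => k - PySem.Int.mod a k)
  let m := need - ((arr.length : Int) - costs.length)
  if m ≤ 0 then 0 else sumSmallest costs m

-- ===== PRECONDITION & SPEC =====
-- Pre_ excludes k = 0, on which Python's '%' raises ZeroDivisionError in both A and B.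
def Pre_minSoldiers (arr : List Int) (k : Int) : Prop := k ≠ 0
instance (arr : List Int) (k : Int) : Decidable (Pre_minSoldiers arr k) := by unfold Pre_minSoldiers; infer_instance
def pvWitness_minSoldiers : List Int × Int := ([3, 5, 6, 8], 4)

def Spec_minSoldiers (arr : List Int) (k : Int) (out : Int) : Prop := out = minSoldiers_alt arr k
instance (arr : List Int) (k : Int) (out : Int) : Decidable (Spec_minSoldiers arr k out) := by unfold Spec_minSoldiers; infer_instance

-- ===== CLAIM (what is proved, stated in full; the proofs are below) =====
def Claim_equal_minSoldiers : Prop := ∀ (arr : List Int) (k : Int), Dom_minSoldiers arr k → Pre_minSoldiers arr k → Spec_minSoldiers arr k (minSoldiers arr k)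

-- ===== LEMMAS AND PROOFS =====

-- all elements of l equal p → sum = p * length
theorem pv_sum_const {p : Int} : ∀ (l : List Int), (∀ x ∈ l, x = p) → l.sum = p * l.length := by
  intro l
  induction l with
  | nil => simp
  | cons a t ih =>
    intro h
    have ha := h a (by simp)
    have := ih (fun x hx => h x (by simp [hx]))
    simp [this, ha]; ring

-- the two complementary filters of a list cover its length
theorem pv_filter_len_split (q : Int → Bool) (l : List Int) :
    (l.filter q).length + (l.filter (fun x => !q x)).length = l.length := by
  simpa using (List.filter_append_perm q l).length_eq

-- A's accumulating for-loop, characterised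
theorem pv_fold_spec (k : Int) : ∀ (arr : List Int) (c : Int) (l : List Int),
    arr.foldl (fun (s : Int × List Int) a =>
      if PySem.Int.mod a k = 0 then (s.1 + 1, s.2)
      else (s.1, s.2 ++ [k - PySem.Int.mod a k])) (c, l)
    = (c + (arr.countP (fun a => decide (PySem.Int.mod a k = 0)) : Int),
       l ++ (arr.filter (fun a => PySem.Int.mod a k ≠ 0)).map (fun a => k - PySem.Int.mod a k)) := by
  intro arr
  induction arr with
  | nil => intro c l; simp
  | cons a t ih =>
    intro c l
    by_cases h : PySem.Int.mod a k = 0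
    · simp only [List.foldl_cons, if_pos h, ih, List.countP_cons, List.filter_cons]
      simp [h]
      push_cast
      ring
    · simp only [List.foldl_cons, if_neg h, ih, List.countP_cons, List.filter_cons]
      simp [h]

-- A's while-loop sums a prefix of the (already long enough) list
theorem pv_loop_spec : ∀ (fuel : Nat) (lst : List Int) (s c mini : Int) (i : Nat),
    (s - c).toNat = fuel → s - c + i ≤ lst.length →
    minSoldiersLoop lst s c mini (i : Int) = mini + ((lst.drop i).take fuel).sum := by
  intro fuel
  induction fuel with
  | zero =>
    intro lst s c mini i hf hle
    rw [minSoldiersLoop]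
    have h : ¬ c < s := by omega
    simp [h]
  | succ f ih =>
    intro lst s c mini i hf hle
    have hcs : c < s := by omega
    rw [minSoldiersLoop]
    rw [dif_pos hcs]
    have hi : i < lst.length := by omega
    rw [PySem.List.pyGet?_natCast, List.getElem?_eq_getElem hi]
    show minSoldiersLoop lst s (c + 1) (mini + lst[i]) ((i : Int) + 1)
        = mini + ((lst.drop i).take (f + 1)).sum
    have hstep := ih lst s (c + 1) (mini + lst[i]) (i + 1) (by omega) (by push_cast; omega)
    push_cast at hstep
    rw [hstep, List.drop_eq_getElem_cons hi, List.take_succ_cons, List.sum_cons]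
    ring

-- B's quickselect recursion equals the prefix-sum of the sorted list
theorem pv_sumSmallest_spec : ∀ (n : Nat) (lst : List Int), lst.length ≤ n →
    ∀ m : Int, 1 ≤ m → m ≤ lst.length →
    sumSmallest lst m = ((PySem.List.sorted lst (fun x => x) false).take m.toNat).sum := by
  intro n
  induction n with
  | zero =>
    intro lst hn m h1 h2
    omega
  | succ n ih =>
    intro lst hn m h1 h2
    have hpos : 0 < lst.length := by omega
    have hidx : lst.length / 2 < lst.length := by omega
    have hget : PySem.List.pyGet? lst (PySem.Int.floordiv (lst.length : Int) 2)
        = some lst[lst.length / 2] := by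
      have h2' : PySem.Int.floordiv (lst.length : Int) 2 = ((lst.length / 2 : Nat) : Int) := by
        rw [PySem.Int.floordiv_eq_ediv_of_pos (by omega)]
        omega
      rw [h2', PySem.List.pyGet?_natCast, List.getElem?_eq_getElem hidx]
    set p := lst[lst.length / 2] with hp
    have hpmem : p ∈ lst := List.getElem_mem hidx
    rw [sumSmallest, hget]
    set L := lst.filter (fun x => x < p) with hL
    set E := lst.filter (fun x => x == p) with hE
    set G := lst.filter (fun x => p < x) with hG
    show (if m ≤ (L.length : Int) then sumSmallest L m
          else if m ≤ (L.length : Int) + (E.length : Int) then L.sum + p * (m - (L.length : Int))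
          else L.sum + p * (E.length : Int) + sumSmallest G (m - (L.length : Int) - (E.length : Int)))
        = ((PySem.List.sorted lst (fun x => x) false).take m.toNat).sum
    -- the partition is a permutation of lst
    have hperm : (L ++ (E ++ G)).Perm lst := by
      have h1p : (L ++ lst.filter (fun x => !decide (x < p))).Perm lst :=
        List.filter_append_perm _ lst
      have hEeq : (lst.filter (fun x => !decide (x < p))).filter (fun x => x == p) = E := by
        rw [List.filter_filter]
        apply List.filter_congr
        intro x hx
        by_cases hxe : x = p <;> simp [hxe]
      have hGeq : (lst.filter (fun x => !decide (x < p))).filter (fun x => !(x == p)) = G := by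
        rw [List.filter_filter]
        apply List.filter_congr
        intro x hx
        rcases lt_trichotomy x p with h | h | h
        · simp [h, lt_asymm h]
        · simp [h]
        · simp [h, ne_of_gt h, lt_asymm h]
      have h2p : (E ++ G).Perm (lst.filter (fun x => !decide (x < p))) := by
        rw [← hEeq, ← hGeq]
        exact List.filter_append_perm _ _
      exact (List.Perm.append_left L h2p).trans h1p
    -- membership facts for the three blocks
    have hLx : ∀ x ∈ L, x < p := by
      intro x hx; rw [hL] at hx; simp [List.mem_filter] at hx; exact hx.2
    have hEx : ∀ x ∈ E, x = p := by
      intro x hx; rw [hE] at hx; simp [List.mem_filter] at hx; exact hx.2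
    have hGx : ∀ x ∈ G, p < x := by
      intro x hx; rw [hG] at hx; simp [List.mem_filter] at hx; exact hx.2
    have hlen3 : L.length + (E.length + G.length) = lst.length := by
      simpa using hperm.length_eq
    -- the sorted list decomposes into the sorted blocks
    have pL : (PySem.List.sorted L (fun x => x) false).Perm L := PySem.List.sorted_perm ..
    have pG : (PySem.List.sorted G (fun x => x) false).Perm G := PySem.List.sorted_perm ..
    have hSLx : ∀ x ∈ PySem.List.sorted L (fun x => x) false, x < p :=
      fun x hx => hLx x (pL.mem_iff.1 hx)
    have hSGx : ∀ x ∈ PySem.List.sorted G (fun x => x) false, p < x :=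
      fun x hx => hGx x (pG.mem_iff.1 hx)
    have hsorted : PySem.List.sorted lst (fun x => x) false
        = (PySem.List.sorted L (fun x => x) false ++ E) ++ PySem.List.sorted G (fun x => x) false := by
      apply PySem.List.sorted_id_eq_of_perm_of_pairwise
      · exact ((pL.append_right E).append pG).trans
          (by simpa [List.append_assoc] using hperm)
      · rw [List.pairwise_append]
        refine ⟨?_, ?_, ?_⟩
        · rw [List.pairwise_append]
          refine ⟨?_, ?_, ?_⟩
          · simpa using PySem.List.sorted_pairwise (xs := L) (key := fun x => x)
          · exact List.pairwise_of_forall_mem_list (fun a ha b hb => by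
              rw [hEx a ha, hEx b hb])
          · intro a ha b hb
            exact le_of_lt (lt_of_lt_of_le (hSLx a ha) (le_of_eq (hEx b hb).symm))
        · simpa using PySem.List.sorted_pairwise (xs := G) (key := fun x => x)
        · intro a ha b hb
          rcases List.mem_append.1 ha with ha' | ha'
          · exact le_of_lt (lt_trans (hSLx a ha') (hSGx b hb))
          · exact le_of_lt (lt_of_le_of_lt (le_of_eq (hEx a ha')) (hSGx b hb))
    have hlenSL : (PySem.List.sorted L (fun x => x) false).length = L.length := pL.length_eq
    have hlenSG : (PySem.List.sorted G (fun x => x) false).length = G.length := pG.length_eq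
    have hLlt : L.length < lst.length := pv_filter_lt_len hpmem
    have hGlt : G.length < lst.length := pv_filter_gt_len hpmem
    by_cases c1 : m ≤ (L.length : Int)
    · rw [if_pos c1]
      rw [ih L (by omega) m h1 c1, hsorted]
      rw [List.take_append_of_le_length (by simp [hlenSL]; omega),
          List.take_append_of_le_length (by rw [hlenSL]; omega)]
    · rw [if_neg c1]
      by_cases c2 : m ≤ (L.length : Int) + (E.length : Int)
      · rw [if_pos c2]
        rw [hsorted, List.take_append, List.take_append]
        have h0 : m.toNat - (PySem.List.sorted L (fun x => x) false ++ E).length = 0 := by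
          rw [List.length_append, hlenSL]; omega
        rw [h0, List.take_zero, List.append_nil,
            List.take_of_length_le (by rw [hlenSL]; omega),
            List.sum_append, pL.sum_eq]
        have hlenTake : (E.take (m.toNat - (PySem.List.sorted L (fun x => x) false).length)).length
            = (m - (L.length : Int)).toNat := by
          rw [List.length_take, hlenSL]; omega
        rw [pv_sum_const _ (fun x hx => hEx x (List.mem_of_mem_take hx)), hlenTake]
        have hcast : (((m - (L.length : Int)).toNat : Nat) : Int) = m - (L.length : Int) := by omega
        rw [hcast]
      · rw [if_neg c2]
        have hm' : 1 ≤ m - (L.length : Int) - (E.length : Int) := by omega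
        have hmG : m - (L.length : Int) - (E.length : Int) ≤ (G.length : Int) := by omega
        rw [hsorted, List.take_append, List.take_append]
        rw [List.take_of_length_le (l := PySem.List.sorted L (fun x => x) false)
              (by rw [hlenSL]; omega)]
        rw [List.take_of_length_le (l := E) (by rw [hlenSL]; omega)]
        have harg : m.toNat - (PySem.List.sorted L (fun x => x) false ++ E).length
            = (m - (L.length : Int) - (E.length : Int)).toNat := by
          rw [List.length_append, hlenSL]; omega
        rw [harg, List.sum_append, List.sum_append, ← ih G (by omega) _ hm' hmG,
            pL.sum_eq, pv_sum_const E hEx]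

-- ===== VERDICT (by name: the statement is the Claim_ definition above) =====
theorem minSoldiers_spec : Claim_equal_minSoldiers := by
  unfold Claim_equal_minSoldiers
  intro arr k _hdom hk
  unfold Spec_minSoldiers minSoldiers minSoldiers_alt
  simp only [pv_fold_spec k arr 0 [], List.nil_append]
  set costs := (arr.filter (fun a => PySem.Int.mod a k ≠ 0)).map (fun a => k - PySem.Int.mod a k)
    with hcosts
  have hclen : (arr.countP (fun a => decide (PySem.Int.mod a k = 0))) + costs.length
      = arr.length := by
    rw [hcosts, List.length_map]
    have := pv_filter_len_split (fun a => decide (PySem.Int.mod a k = 0)) arr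
    rw [← this]
    congr 1
    · simp [← List.countP_eq_length_filter]
    · exact congrArg List.length (List.filter_congr (fun x _ => by simp))
  set cnt : Int := (0 : Int) + (arr.countP (fun a => decide (PySem.Int.mod a k = 0)) : Int)
    with hcnt
  have hmod2 : PySem.Int.mod (arr.length : Int) 2 = (arr.length : Int) % 2 :=
    PySem.Int.mod_eq_emod_of_pos (by omega)
  have hdiv2 : PySem.Int.floordiv (arr.length : Int) 2 = (arr.length : Int) / 2 :=
    PySem.Int.floordiv_eq_ediv_of_pos (by omega)
  have hdiv2' : PySem.Int.floordiv ((arr.length : Int) + 1) 2 = ((arr.length : Int) + 1) / 2 :=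
    PySem.Int.floordiv_eq_ediv_of_pos (by omega)
  set soldiers : Int := if PySem.Int.mod (arr.length : Int) 2 = 0
      then PySem.Int.floordiv (arr.length : Int) 2
      else PySem.Int.floordiv (arr.length : Int) 2 + 1 with hsol
  have hsn : soldiers = PySem.Int.floordiv ((arr.length : Int) + 1) 2 := by
    rw [hsol, hmod2, hdiv2, hdiv2']
    by_cases h : (arr.length : Int) % 2 = 0 <;> simp [h] <;> omega
  have hm : PySem.Int.floordiv ((arr.length : Int) + 1) 2
      - ((arr.length : Int) - (costs.length : Int)) = soldiers - cnt := by
    rw [hsn, hcnt]; omega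
  by_cases hc : cnt ≥ soldiers
  · rw [if_pos hc, if_pos (by omega)]
  · rw [if_neg hc, if_neg (by rw [hm]; omega)]
    have hsle : soldiers ≤ (arr.length : Int) := by
      rw [hsn, hdiv2']; omega
    have hles : soldiers - cnt ≤ ((PySem.List.sorted costs (fun x => x) false).length : Int) := by
      rw [PySem.List.length_sorted]; omega
    have hloop := pv_loop_spec (soldiers - cnt).toNat
      (PySem.List.sorted costs (fun x => x) false) soldiers cnt 0 0 rfl
      (by rw [PySem.List.length_sorted]; push_cast; omega)
    simp only [Nat.cast_zero] at hloop
    rw [hloop, List.drop_zero, hm]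
    rw [pv_sumSmallest_spec costs.length costs le_rfl (soldiers - cnt) (by omega) (by omega)]
    simp
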